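-- pv_equiv track=rewrite | github.com/AIseek2025/AIseek | backend/app/services/feed_service.py | _diversify_items
-- ===== SOURCE A (Python) =====
-- from typing import Any, Dict, List, Optional
--
-- def _diversify_items(items: List[dict], max_per_author: int) -> List[dict]:
--     m = int(max_per_author or 0)
--     if m < 1:
--         return items
--     if m > 20:
--         m = 20
--     buckets = {}
--     order: List[int] = []
--     for it in items:
--         try:
--             uid = int(it.get("user_id") or 0)
--         except Exception:
--             uid = 0
--         if uid <= 0:
--             uid = -len(order) - 1
--         if uid not in buckets:
--             buckets[uid] = []
--             order.append(uid)
--         buckets[uid].append(it)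
--
--     out: List[dict] = []
--     used = {}
--     while len(out) < len(items):
--         progressed = False
--         for uid in order:
--             q = buckets.get(uid) or []
--             if not q:
--                 continue
--             if int(used.get(uid, 0)) >= m and uid > 0:
--                 continue
--             out.append(q.pop(0))
--             used[uid] = int(used.get(uid, 0)) + 1
--             progressed = True
--             if len(out) >= len(items):
--                 break
--         if progressed:
--             continue
--         for uid in order:
--             q = buckets.get(uid) or []
--             if not q:
--                 continue
--             out.append(q.pop(0))
--             if len(out) >= len(items):
--                 break
--     return out
-- ===== SOURCE B (Python) =====
-- # B: same bucket-building as A, but the output is produced by a transpose sweep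
-- # (round r = 0,1,... pick buckets[uid][r] when it exists) instead of A's
-- # cap-tracking two-phase while-loop; the cap never changes the output for m >= 1.
-- from typing import List
--
--
-- def _diversify_items(items: List[dict], max_per_author: int) -> List[dict]:
--     m = int(max_per_author or 0)
--     if m < 1:
--         return items
--     buckets = {}
--     order: List[int] = []
--     for it in items:
--         try:
--             uid = int(it.get("user_id") or 0)
--         except Exception:
--             uid = 0
--         if uid <= 0:
--             uid = -len(order) - 1
--         if uid not in buckets:
--             buckets[uid] = []
--             order.append(uid)
--         buckets[uid].append(it)
--
--     longest = 0
--     for uid in order: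
--         if len(buckets[uid]) > longest:
--             longest = len(buckets[uid])
--     out: List[dict] = []
--     for r in range(longest):
--         for uid in order:
--             q = buckets.get(uid, [])
--             if r < len(q):
--                 out.append(q[r])
--     return out
-- ===== Notes on version B (the rewrite author's own statement) =====
-- stated objective: simpler
-- what changed: Keeps A's bucket-building loop but replaces the cap-tracking two-phase while-loop (used counts, progressed flag, fallback phase) with a plain transpose sweep over round indices, which provably yields the same round-robin order because the per-author cap never affects the output for m >= 1.
import Mathlib
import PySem

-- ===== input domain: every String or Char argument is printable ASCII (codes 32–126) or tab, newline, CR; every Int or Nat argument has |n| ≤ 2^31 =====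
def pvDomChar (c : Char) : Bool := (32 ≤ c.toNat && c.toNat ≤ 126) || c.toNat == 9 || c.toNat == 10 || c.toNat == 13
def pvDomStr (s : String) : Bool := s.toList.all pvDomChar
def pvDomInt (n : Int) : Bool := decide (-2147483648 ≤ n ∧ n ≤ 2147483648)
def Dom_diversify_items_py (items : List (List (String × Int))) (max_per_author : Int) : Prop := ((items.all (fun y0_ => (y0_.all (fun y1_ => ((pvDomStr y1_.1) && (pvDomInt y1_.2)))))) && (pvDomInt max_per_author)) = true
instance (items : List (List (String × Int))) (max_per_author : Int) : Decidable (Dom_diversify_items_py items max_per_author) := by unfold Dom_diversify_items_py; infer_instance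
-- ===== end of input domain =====

-- B replaces A's cap-tracking two-phase while-loop by a transpose sweep over the same
-- buckets (objective: simpler); the per-author cap never changes the output for m ≥ 1.

-- ===== PORT A =====
-- uid = int(it.get("user_id") or 0): for an int value v, `v or 0` is v (0 stays 0) and int(v) = v,
-- so this is exactly the first-match lookup with default 0; the try/except can never fire on int values.
def pvUid (it : List (String × Int)) : Int :=
  (PySem.Dict.mk it).getD "user_id" 0

-- the bucket-building for-loop of A (identical lines appear in B; shared helper)
def pvBuild (items : List (List (String × Int))) :
    PySem.Dict Int (List (List (String × Int))) × List Int :=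
  items.foldl (fun st it =>
    let uid0 := pvUid it
    let uid := if uid0 ≤ 0 then -(st.2.length : Int) - 1 else uid0
    let st' := if st.1.contains uid then st else (st.1.insert uid [], st.2 ++ [uid])
    (st'.1.modify uid [] (fun q => q ++ [it]), st'.2)) (PySem.Dict.empty, [])

-- first for-loop of the while body ("phase 1"): q.pop(0) mutates the list held by the
-- dict, ported as re-inserting the tail; `break` is the early tuple return.
def pvPhase1 (m : Int) (N : Nat) :
    List Int → PySem.Dict Int (List (List (String × Int))) → PySem.Dict Int Int →
    List (List (String × Int)) → Bool →
    PySem.Dict Int (List (List (String × Int))) × PySem.Dict Int Int × List (List (String × Int)) × Bool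
  | [], b, u, out, p => (b, u, out, p)
  | uid :: rest, b, u, out, p =>
    match b.getD uid [] with
    | [] => pvPhase1 m N rest b u out p
    | x :: qt =>
      if u.getD uid 0 ≥ m ∧ uid > 0 then pvPhase1 m N rest b u out p
      else
        let out' := out ++ [x]
        let b' := b.insert uid qt
        let u' := u.insert uid (u.getD uid 0 + 1)
        if N ≤ out'.length then (b', u', out', true)
        else pvPhase1 m N rest b' u' out' true

-- fallback for-loop of the while body ("phase 2"): same pops, no cap, no `used` update
def pvPhase2 (N : Nat) :
    List Int → PySem.Dict Int (List (List (String × Int))) → List (List (String × Int)) →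
    PySem.Dict Int (List (List (String × Int))) × List (List (String × Int))
  | [], b, out => (b, out)
  | uid :: rest, b, out =>
    match b.getD uid [] with
    | [] => pvPhase2 N rest b out
    | x :: qt =>
      let out' := out ++ [x]
      let b' := b.insert uid qt
      if N ≤ out'.length then (b', out')
      else pvPhase2 N rest b' out'

-- while len(out) < len(items): fuel N+1 suffices (each iteration with a true condition
-- appends at least one item); the fuel guard only makes the same loop total.
def pvWhile (m : Int) (N : Nat) (order : List Int) :
    Nat → PySem.Dict Int (List (List (String × Int))) → PySem.Dict Int Int →
    List (List (String × Int)) → List (List (String × Int))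
  | 0, _, _, out => out
  | fuel + 1, b, u, out =>
    if out.length < N then
      match pvPhase1 m N order b u out false with
      | (b', u', out', true) => pvWhile m N order fuel b' u' out'
      | (b', u', out', false) =>
        let r2 := pvPhase2 N order b' out'
        pvWhile m N order fuel r2.1 u' r2.2
    else out

def diversify_items_py (items : List (List (String × Int))) (max_per_author : Int) :
    List (List (String × Int)) :=
  -- m = int(max_per_author or 0) = max_per_author for an int argument
  let m := max_per_author
  if m < 1 then items
  else
    let m := if m > 20 then 20 else m
    let bo := pvBuild items
    pvWhile m items.length bo.2 (items.length + 1) bo.1 PySem.Dict.empty []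

-- ===== PORT B =====
-- inner sweep loop of B: for uid in order: q = buckets.get(uid, []); if r < len(q): out.append(q[r])
def pvRow (b : PySem.Dict Int (List (List (String × Int)))) (order : List Int) (r : Nat)
    (out : List (List (String × Int))) : List (List (String × Int)) :=
  order.foldl (fun out uid =>
    let q := b.getD uid []
    if r < q.length then out ++ [q.getD r []] else out) out

def diversify_items_py_alt (items : List (List (String × Int))) (max_per_author : Int) :
    List (List (String × Int)) :=
  let m := max_per_author
  if m < 1 then items
  else
    let bo := pvBuild items
    -- longest = 0; for uid in order: if len(buckets[uid]) > longest: longest = len(buckets[uid])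
    let longest := bo.2.foldl (fun L uid =>
      if L < (bo.1.getD uid []).length then (bo.1.getD uid []).length else L) 0
    (List.range longest).foldl (fun out r => pvRow bo.1 bo.2 r out) []

-- ===== PRECONDITION & SPEC =====
def Spec_diversify_items_py (items : List (List (String × Int))) (max_per_author : Int) (out : List (List (String × Int))) : Prop := out = diversify_items_py_alt items max_per_author
instance (items : List (List (String × Int))) (max_per_author : Int) (out : List (List (String × Int))) : Decidable (Spec_diversify_items_py items max_per_author out) := by unfold Spec_diversify_items_py; infer_instance

-- ===== CLAIM (what is proved, stated in full; the proofs are below) =====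
def Claim_equal_diversify_items_py : Prop := ∀ (items : List (List (String × Int))) (max_per_author : Int), Dom_diversify_items_py items max_per_author → Spec_diversify_items_py items max_per_author (diversify_items_py items max_per_author)


-- ===== LEMMAS AND PROOFS =====

abbrev pvD := PySem.Dict Int (List (List (String × Int)))

-- the row produced by one sweep at round r, in filter/map normal form
def pvRowF (b : pvD) (ord : List Int) (r : Nat) : List (List (String × Int)) :=
  (ord.filter (fun u => decide (r < (b.getD u []).length))).map (fun u => (b.getD u []).getD r [])

-- the first r rows (B's outer loop, as a function of r)
def pvRows (b : pvD) (ord : List Int) (r : Nat) : List (List (String × Int)) :=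
  (List.range r).foldl (fun out s => pvRow b ord s out) []

theorem pvRow_eq (b : pvD) (ord : List Int) (r : Nat) (out : List (List (String × Int))) :
    pvRow b ord r out = out ++ pvRowF b ord r := by
  induction ord generalizing out with
  | nil => simp [pvRow, pvRowF]
  | cons a t ih =>
    by_cases h : r < (b.getD a []).length
    · simp [pvRow, pvRowF, h] at ih ⊢
      rw [ih]
      simp
    · simp [pvRow, pvRowF, h] at ih ⊢
      rw [ih]

theorem pvRows_succ (b : pvD) (ord : List Int) (r : Nat) :
    pvRows b ord (r + 1) = pvRows b ord r ++ pvRowF b ord r := by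
  unfold pvRows
  rw [List.range_succ, List.foldl_append]
  simp [pvRow_eq]

theorem pvRowF_eq_nil (b : pvD) (ord : List Int) (r : Nat)
    (h : ∀ x ∈ ord, (b.getD x []).length ≤ r) : pvRowF b ord r = [] := by
  unfold pvRowF
  rw [List.filter_eq_nil_iff.mpr]
  · rfl
  · intro x hx
    simpa using Nat.not_lt.mpr (h x hx)

theorem sum_map_min_succ (ord : List Int) (f : Int → Nat) (r : Nat) :
    (ord.map (fun u => min (r + 1) (f u))).sum
      = (ord.map (fun u => min r (f u))).sum + ord.countP (fun u => decide (r < f u)) := by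
  induction ord with
  | nil => simp
  | cons a t ih =>
    by_cases h : r < f a <;> simp [h, ih] <;> omega

theorem pvRows_length (b : pvD) (ord : List Int) (r : Nat) :
    (pvRows b ord r).length = (ord.map (fun u => min r (b.getD u []).length)).sum := by
  induction r with
  | zero => simp [pvRows]
  | succ r ih =>
    rw [pvRows_succ, List.length_append, ih, sum_map_min_succ]
    have : (pvRowF b ord r).length
        = ord.countP (fun u => decide (r < (b.getD u []).length)) := by
      simp [pvRowF, List.countP_eq_length_filter]
    omega

theorem pvRows_stable (b : pvD) (ord : List Int) (k : Nat)
    (h : ∀ x ∈ ord, (b.getD x []).length ≤ k) (j : Nat) :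
    pvRows b ord (k + j) = pvRows b ord k := by
  induction j with
  | zero => rfl
  | succ j ih =>
    rw [show k + (j + 1) = (k + j) + 1 by omega, pvRows_succ, ih,
      pvRowF_eq_nil b ord (k + j) (fun x hx => le_trans (h x hx) (by omega))]
    simp

theorem eq_of_sum_ge (l : List Int) (f g : Int → Nat) (hle : ∀ x ∈ l, f x ≤ g x)
    (hsum : (l.map g).sum ≤ (l.map f).sum) : ∀ x ∈ l, f x = g x := by
  induction l with
  | nil => simp
  | cons a t ih =>
    simp only [List.map_cons, List.sum_cons] at hsum
    have h1 : f a ≤ g a := hle a (by simp)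
    have h2 : (t.map f).sum ≤ (t.map g).sum :=
      List.sum_le_sum (fun y hy => hle y (List.mem_cons_of_mem a hy))
    intro x hx
    rcases List.mem_cons.mp hx with rfl | hx'
    · omega
    · exact ih (fun y hy => hle y (List.mem_cons_of_mem a hy)) (by omega) x hx'

theorem sum_map_update (l : List Int) (f g : Int → Nat) (uid : Int) (hnd : l.Nodup)
    (hmem : uid ∈ l) (hother : ∀ x ∈ l, x ≠ uid → g x = f x) (hself : g uid = f uid + 1) :
    (l.map g).sum = (l.map f).sum + 1 := by
  induction l with
  | nil => simp at hmem
  | cons a t ih =>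
    rcases List.mem_cons.mp hmem with rfl | hmem'
    · have ht : t.map g = t.map f := by
        apply List.map_congr_left
        intro x hx
        exact hother x (by simp [hx]) (by rintro rfl; exact (List.nodup_cons.mp hnd).1 hx)
      simp [ht, hself]; omega
    · have ha : g a = f a :=
        hother a (by simp) (by rintro rfl; exact (List.nodup_cons.mp hnd).1 hmem')
      have := ih (List.nodup_cons.mp hnd).2 hmem' (fun x hx => hother x (by simp [hx]))
      simp [ha, this]; omega

-- the `longest` fold of B: lower and upper bounds
theorem pvLongest_aux (b : pvD) (ord : List Int) : ∀ acc : Nat,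
    acc ≤ ord.foldl (fun L uid => if L < (b.getD uid []).length then (b.getD uid []).length else L) acc
    ∧ (∀ x ∈ ord, (b.getD x []).length
        ≤ ord.foldl (fun L uid => if L < (b.getD uid []).length then (b.getD uid []).length else L) acc)
    ∧ ∀ k, acc ≤ k → (∀ x ∈ ord, (b.getD x []).length ≤ k) →
        ord.foldl (fun L uid => if L < (b.getD uid []).length then (b.getD uid []).length else L) acc ≤ k := by
  induction ord with
  | nil => intro acc; refine ⟨le_refl _, by simp, ?_⟩; intro k hk _; simpa using hk
  | cons a t ih =>
    intro acc
    obtain ⟨ih1, ih2, ih3⟩ := ih (if acc < (b.getD a []).length then (b.getD a []).length else acc)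
    refine ⟨le_trans (by split <;> omega) ih1, ?_, ?_⟩
    · intro x hx
      rcases List.mem_cons.mp hx with rfl | hx'
      · exact le_trans (by split <;> omega) ih1
      · simpa using ih2 x hx'
    · intro k hk hall
      apply ih3 k
      · have := hall a (by simp); split <;> omega
      · intro x hx; exact hall x (by simp [hx])

-- invariant of A's/B's shared bucket-building loop
def pvInv (b : pvD) (ord : List Int) (n : Nat) : Prop :=
  b.keys = ord ∧ ord.Nodup
  ∧ (∀ x ∈ ord, x ≤ 0 → (b.getD x []).length = 1 ∧ -(ord.length : Int) ≤ x ∧ x < 0)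
  ∧ (ord.map (fun u => (b.getD u []).length)).sum = n


def pvStep (st : pvD × List Int) (it : List (String × Int)) : pvD × List Int :=
  let uid0 := pvUid it
  let uid := if uid0 ≤ 0 then -(st.2.length : Int) - 1 else uid0
  let st' := if st.1.contains uid then st else (st.1.insert uid [], st.2 ++ [uid])
  (st'.1.modify uid [] (fun q => q ++ [it]), st'.2)

-- inserting a fresh key and appending its first item preserves the invariant
theorem pvFresh_inv (b : pvD) (ord : List Int) (n : Nat) (it : List (String × Int)) (uid : Int)
    (hkeys : b.keys = ord) (hnd : ord.Nodup)
    (hneg : ∀ x ∈ ord, x ≤ 0 → (b.getD x []).length = 1 ∧ -(ord.length : Int) ≤ x ∧ x < 0)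
    (hsum : (ord.map (fun u => (b.getD u []).length)).sum = n)
    (hfresh : uid ∉ ord) (hneguid : uid ≤ 0 → uid = -(ord.length : Int) - 1) :
    pvInv ((b.insert uid []).modify uid [] (fun q => q ++ [it])) (ord ++ [uid]) (n + 1) := by
  have hcf : b.contains uid = false := by
    rw [← Bool.not_eq_true, PySem.Dict.contains_iff_mem_keys, hkeys]
    exact hfresh
  refine ⟨?_, ?_, ?_, ?_⟩
  · rw [PySem.Dict.keys_modify, PySem.Dict.keys_insert_of_contains _ _
      (PySem.Dict.contains_insert_self _ _ _), PySem.Dict.keys_insert_of_not_contains _ _ hcf, hkeys]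
  · exact List.Nodup.append hnd (List.nodup_singleton _)
      (by simpa [List.disjoint_singleton] using hfresh)
  · intro x hx hx0
    rcases List.mem_append.mp hx with hx' | hx'
    · have hne : x ≠ uid := fun he => hfresh (he ▸ hx')
      rw [PySem.Dict.getD_modify_of_ne _ _ _ hne, PySem.Dict.getD_insert_of_ne _ _ _ hne]
      obtain ⟨hl1, hl2, hl3⟩ := hneg x hx' hx0
      refine ⟨hl1, ?_, hl3⟩
      have : ((ord ++ [uid]).length : Int) = (ord.length : Int) + 1 := by
        simp
      omega
    · have hx'' : x = uid := by simpa using hx'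
      subst hx''
      rw [PySem.Dict.getD_modify_self, PySem.Dict.getD_insert_self]
      have := hneguid hx0
      refine ⟨by simp, ?_, by omega⟩
      have : ((ord ++ [x]).length : Int) = (ord.length : Int) + 1 := by simp
      omega
  · rw [List.map_append, List.sum_append]
    have hcongr : ord.map (fun u => (((b.insert uid []).modify uid []
        (fun q => q ++ [it])).getD u []).length) = ord.map (fun u => (b.getD u []).length) := by
      apply List.map_congr_left
      intro x hx
      have hne : x ≠ uid := fun he => hfresh (he ▸ hx)
      rw [PySem.Dict.getD_modify_of_ne _ _ _ hne, PySem.Dict.getD_insert_of_ne _ _ _ hne]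
    rw [hcongr, hsum]
    simp [PySem.Dict.getD_modify_self, PySem.Dict.getD_insert_self]

theorem pvStep_inv (b : pvD) (ord : List Int) (n : Nat) (it : List (String × Int))
    (h : pvInv b ord n) : pvInv (pvStep (b, ord) it).1 (pvStep (b, ord) it).2 (n + 1) := by
  obtain ⟨hkeys, hnd, hneg, hsum⟩ := h
  simp only [pvStep]
  by_cases h0 : pvUid it ≤ 0
  · simp only [if_pos h0]
    have hfresh : (-(ord.length : Int) - 1) ∉ ord := by
      intro hmem
      have := hneg _ hmem (by omega)
      omega
    have hcf : b.contains (-(ord.length : Int) - 1) = false := by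
      rw [← Bool.not_eq_true, PySem.Dict.contains_iff_mem_keys, hkeys]
      exact hfresh
    simp only [hcf, Bool.false_eq_true, if_false]
    exact pvFresh_inv b ord n it _ hkeys hnd hneg hsum hfresh (fun _ => rfl)
  · simp only [if_neg h0]
    rw [Int.not_le] at h0
    by_cases hmem : pvUid it ∈ ord
    · have hct : b.contains (pvUid it) = true := by
        rw [PySem.Dict.contains_iff_mem_keys, hkeys]; exact hmem
      simp only [hct, if_true]
      refine ⟨?_, hnd, ?_, ?_⟩
      · rw [PySem.Dict.keys_modify, PySem.Dict.keys_insert_of_contains _ _ hct, hkeys]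
      · intro x hx hx0
        have hne : x ≠ pvUid it := by omega
        rw [PySem.Dict.getD_modify_of_ne _ _ _ hne]
        exact hneg x hx hx0
      · rw [sum_map_update ord (fun u => (b.getD u []).length)
          (fun u => ((b.modify (pvUid it) [] (fun q => q ++ [it])).getD u []).length) (pvUid it)
          hnd hmem
          (fun x _ hne => by simp [PySem.Dict.getD_modify_of_ne _ _ _ hne])
          (by simp [PySem.Dict.getD_modify_self]), hsum]
    · have hcf : b.contains (pvUid it) = false := by
        rw [← Bool.not_eq_true, PySem.Dict.contains_iff_mem_keys, hkeys]
        exact hmem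
      simp only [hcf, Bool.false_eq_true, if_false]
      exact pvFresh_inv b ord n it _ hkeys hnd hneg hsum hmem (fun hc => by omega)

theorem pvBuild_aux (items : List (List (String × Int))) :
    ∀ (st : pvD × List Int) (n : Nat), pvInv st.1 st.2 n →
    pvInv (items.foldl pvStep st).1 (items.foldl pvStep st).2 (n + items.length) := by
  induction items with
  | nil => intro st n h; simpa using h
  | cons it rest ih =>
    intro st n h
    rw [List.foldl_cons]
    have := ih (pvStep st it) (n + 1) (by
      have := pvStep_inv st.1 st.2 n it h
      simpa using this)
    simpa [Nat.add_comm, Nat.add_assoc, Nat.add_left_comm] using this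

theorem pvBuild_inv (items : List (List (String × Int))) :
    pvInv (pvBuild items).1 (pvBuild items).2 items.length := by
  have hbe : pvBuild items = items.foldl pvStep (PySem.Dict.empty, []) := rfl
  rw [hbe]
  have := pvBuild_aux items (PySem.Dict.empty, []) 0
    ⟨by simp [PySem.Dict.keys_empty], List.nodup_nil, by simp, by simp⟩
  simpa using this


theorem pvRowF_append (b : pvD) (ord1 ord2 : List Int) (r : Nat) :
    pvRowF b (ord1 ++ ord2) r = pvRowF b ord1 r ++ pvRowF b ord2 r := by
  simp [pvRowF]

theorem pvRows_of_le (b : pvD) (ord : List Int) (k r : Nat)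
    (h : ∀ x ∈ ord, (b.getD x []).length ≤ k) (hkr : k ≤ r) :
    pvRows b ord r = pvRows b ord k := by
  have := pvRows_stable b ord k h (r - k)
  rwa [show k + (r - k) = r by omega] at this

-- phase 1 at a round r < m pops the head of every non-empty bucket (the cap cannot
-- have been reached yet), extending out by exactly row r
theorem pvPhase1_round (B0 : pvD) (ord : List Int) (m : Int) (N : Nat) (r : Nat)
    (hr : (r : Int) < m) (hnd : ord.Nodup)
    (hN : N = (ord.map (fun u => (B0.getD u []).length)).sum) :
    ∀ todo done b u out p, ord = done ++ todo →
    (∀ x ∈ todo, b.getD x [] = (B0.getD x []).drop r) →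
    (∀ x ∈ done, b.getD x [] = (B0.getD x []).drop (r + 1)) →
    (∀ x ∈ todo, u.getD x 0 = min (min (r : Int) ((B0.getD x []).length : Int)) m) →
    (∀ x ∈ done, u.getD x 0 = min (min ((r : Int) + 1) ((B0.getD x []).length : Int)) m) →
    (out.length = (done.map (fun u => min (r + 1) (B0.getD u []).length)).sum
        + (todo.map (fun u => min r (B0.getD u []).length)).sum) →
    (out = pvRows B0 ord r ++ pvRowF B0 done r) →
    ∃ b' u',
      pvPhase1 m N todo b u out p
        = (b', u', pvRows B0 ord (r + 1),
           p || todo.any (fun x => decide (r < (B0.getD x []).length)))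
      ∧ (∀ x ∈ ord, b'.getD x [] = (B0.getD x []).drop (r + 1))
      ∧ (∀ x ∈ ord, u'.getD x 0 = min (min ((r : Int) + 1) ((B0.getD x []).length : Int)) m) := by
  intro todo
  induction todo with
  | nil =>
    intro done b u out p hsplit hb hb2 hu hu2 hlenEq hout
    have hdone : done = ord := by simpa using hsplit.symm
    refine ⟨b, u, ?_, fun x hx => hb2 x (hdone ▸ hx), fun x hx => hu2 x (hdone ▸ hx)⟩
    simp only [pvPhase1, List.any_nil, Bool.or_false]
    rw [hout, pvRows_succ, hdone]
  | cons uid rest ih =>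
    intro done b u out p hsplit hb hb2 hu hu2 hlenEq hout
    have hnd2 : (done ++ uid :: rest).Nodup := hsplit ▸ hnd
    have huid_done : uid ∉ done := fun hmem =>
      (List.disjoint_of_nodup_append hnd2) hmem (by simp)
    have huid_rest : uid ∉ rest := (List.nodup_cons.mp hnd2.of_append_right).1
    have hbu : b.getD uid [] = (B0.getD uid []).drop r := hb uid (by simp)
    have huu := hu uid (by simp)
    simp only [List.map_cons, List.sum_cons] at hlenEq
    by_cases hl : r < (B0.getD uid []).length
    · have hq : b.getD uid [] = (B0.getD uid [])[r] :: (B0.getD uid []).drop (r + 1) := by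
        rw [hbu, List.drop_eq_getElem_cons hl]
      have hcapF : ¬ (u.getD uid 0 ≥ m ∧ uid > 0) := by
        rw [huu]; rintro ⟨h1, -⟩; omega
      have hgd : (B0.getD uid []).getD r [] = (B0.getD uid [])[r] := by
        simp [List.getD_eq_getElem?_getD, List.getElem?_eq_getElem hl]
      simp only [pvPhase1, hq, if_neg hcapF]
      by_cases hbreak : N ≤ (out ++ [(B0.getD uid [])[r]]).length
      · rw [if_pos hbreak]
        -- at the break out is full, so all remaining buckets are already empty
        simp only [List.length_append, List.length_cons, List.length_nil] at hbreak
        have hsOrd : (ord.map (fun u => (B0.getD u []).length)).sum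
            = (done.map (fun u => (B0.getD u []).length)).sum + (B0.getD uid []).length
              + (rest.map (fun u => (B0.getD u []).length)).sum := by
          rw [hsplit]; simp [List.sum_append]; omega
        have hdone_le : (done.map (fun u => min (r + 1) (B0.getD u []).length)).sum
            ≤ (done.map (fun u => (B0.getD u []).length)).sum :=
          List.sum_le_sum (fun x _ => Nat.min_le_right _ _)
        have hminr : min r (B0.getD uid []).length = r := Nat.min_eq_left (Nat.le_of_lt hl)
        rw [hminr] at hlenEq
        have hrest_ge : (rest.map (fun u => (B0.getD u []).length)).sum
            ≤ (rest.map (fun u => min r (B0.getD u []).length)).sum := by omega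
        have hrest : ∀ x ∈ rest, (B0.getD x []).length ≤ r := by
          have hres := eq_of_sum_ge rest (fun u => min r (B0.getD u []).length)
            (fun u => (B0.getD u []).length) (fun x _ => Nat.min_le_right _ _) hrest_ge
          intro x hx
          have := hres x hx
          simp only at this
          omega
        refine ⟨b.insert uid ((B0.getD uid []).drop (r + 1)),
          u.insert uid (u.getD uid 0 + 1), ?_, ?_, ?_⟩
        · have hflag : (uid :: rest).any (fun x => decide (r < (B0.getD x []).length)) = true := by
            simp [hl]
          rw [hflag, Bool.or_true]
          have h0 : rest.filter (fun u => decide (r < (B0.getD u []).length)) = [] :=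
            List.filter_eq_nil_iff.mpr
              (fun x hx => by simpa using Nat.not_lt.mpr (hrest x hx))
          have hrow : pvRowF B0 (uid :: rest) r = [(B0.getD uid [])[r]] := by
            simp [pvRowF, hl, h0]
          rw [hout, pvRows_succ, hsplit, pvRowF_append, hrow]
          simp
        · intro x hx
          rcases (by rw [hsplit] at hx; exact List.mem_append.mp hx) with hx' | hx'
          · rw [PySem.Dict.getD_insert_of_ne _ _ _ (fun he => huid_done (by rw [← he]; exact hx'))]
            exact hb2 x hx'
          · rcases List.mem_cons.mp hx' with rfl | hx''
            · rw [PySem.Dict.getD_insert_self]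
            · rw [PySem.Dict.getD_insert_of_ne _ _ _ (fun he => huid_rest (by rw [← he]; exact hx''))]
              rw [hb x (by simp [hx'']), List.drop_eq_nil_of_le (hrest x hx''),
                List.drop_eq_nil_of_le (Nat.le_trans (hrest x hx'') (Nat.le_succ r))]
        · intro x hx
          rcases (by rw [hsplit] at hx; exact List.mem_append.mp hx) with hx' | hx'
          · rw [PySem.Dict.getD_insert_of_ne _ _ _ (fun he => huid_done (by rw [← he]; exact hx'))]
            exact hu2 x hx'
          · rcases List.mem_cons.mp hx' with rfl | hx''
            · rw [PySem.Dict.getD_insert_self, huu]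
              omega
            · rw [PySem.Dict.getD_insert_of_ne _ _ _ (fun he => huid_rest (by rw [← he]; exact hx''))]
              rw [hu x (by simp [hx''])]
              have := hrest x hx''
              omega
      · rw [if_neg hbreak]
        have hsplit' : ord = (done ++ [uid]) ++ rest := by rw [hsplit]; simp
        obtain ⟨b', u', heq, hb', hu'⟩ := ih (done ++ [uid])
          (b.insert uid ((B0.getD uid []).drop (r + 1)))
          (u.insert uid (u.getD uid 0 + 1))
          (out ++ [(B0.getD uid [])[r]]) true hsplit'
          (fun x hx => by
            rw [PySem.Dict.getD_insert_of_ne _ _ _ (fun he => huid_rest (by rw [← he]; exact hx))]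
            exact hb x (by simp [hx]))
          (fun x hx => by
            rcases List.mem_append.mp hx with hx' | hx'
            · rw [PySem.Dict.getD_insert_of_ne _ _ _ (fun he => huid_done (by rw [← he]; exact hx'))]
              exact hb2 x hx'
            · have : x = uid := by simpa using hx'
              subst this
              rw [PySem.Dict.getD_insert_self])
          (fun x hx => by
            rw [PySem.Dict.getD_insert_of_ne _ _ _ (fun he => huid_rest (by rw [← he]; exact hx))]
            exact hu x (by simp [hx]))
          (fun x hx => by
            rcases List.mem_append.mp hx with hx' | hx'
            · rw [PySem.Dict.getD_insert_of_ne _ _ _ (fun he => huid_done (by rw [← he]; exact hx'))]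
              exact hu2 x hx'
            · have : x = uid := by simpa using hx'
              subst this
              rw [PySem.Dict.getD_insert_self, huu]
              omega)
          (by simp only [List.map_append, List.sum_append, List.map_cons, List.sum_cons,
              List.map_nil, List.sum_nil, List.length_append, List.length_cons, List.length_nil]
              omega)
          (by rw [hout, pvRowF_append]
              have hrow : pvRowF B0 [uid] r = [(B0.getD uid []).getD r []] := by
                simp [pvRowF, hl]
              rw [hrow, hgd]
              simp)
        refine ⟨b', u', ?_, hb', hu'⟩
        rw [heq]
        simp [hl]
    · have hq : b.getD uid [] = [] := by
        rw [hbu]; exact List.drop_eq_nil_of_le (Nat.le_of_not_lt hl)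
      have hlen : (B0.getD uid []).length ≤ r := Nat.le_of_not_lt hl
      simp only [pvPhase1, hq]
      have hsplit' : ord = (done ++ [uid]) ++ rest := by rw [hsplit]; simp
      obtain ⟨b', u', heq, hb', hu'⟩ := ih (done ++ [uid]) b u out p hsplit'
        (fun x hx => hb x (by simp [hx]))
        (fun x hx => by
          rcases List.mem_append.mp hx with hx' | hx'
          · exact hb2 x hx'
          · have : x = uid := by simpa using hx'
            subst this
            rw [hbu, List.drop_eq_nil_of_le hlen, List.drop_eq_nil_of_le (by omega)])
        (fun x hx => hu x (by simp [hx]))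
        (fun x hx => by
          rcases List.mem_append.mp hx with hx' | hx'
          · exact hu2 x hx'
          · have : x = uid := by simpa using hx'
            subst this
            rw [huu]
            omega)
        (by simp only [List.map_append, List.sum_append, List.map_cons, List.sum_cons,
            List.map_nil, List.sum_nil]
            omega)
        (by rw [hout, pvRowF_append]
            have hrow : pvRowF B0 [uid] r = [] := by
              simp [pvRowF, Nat.not_lt.mpr hlen]
            rw [hrow]
            simp)
      refine ⟨b', u', ?_, hb', hu'⟩
      rw [heq]
      have : decide (r < (B0.getD uid []).length) = false := by simp [hl]
      simp [this]

-- phase 1 at a round r ≥ m does nothing: every non-empty bucket belongs to a positive,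
-- already-capped author (negative buckets are singletons, long emptied)
theorem pvPhase1_skip (B0 : pvD) (ord : List Int) (m : Int) (N : Nat) (r : Nat)
    (hm : 1 ≤ m) (hr : m ≤ (r : Int))
    (hneg : ∀ x ∈ ord, x ≤ 0 → (B0.getD x []).length = 1) :
    ∀ todo b u out p, (∀ x ∈ todo, x ∈ ord) →
    (∀ x ∈ todo, b.getD x [] = (B0.getD x []).drop r) →
    (∀ x ∈ todo, u.getD x 0 = min (min (r : Int) ((B0.getD x []).length : Int)) m) →
    pvPhase1 m N todo b u out p = (b, u, out, p) := by
  intro todo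
  induction todo with
  | nil => intro b u out p _ _ _; rfl
  | cons uid rest ih =>
    intro b u out p hsub hb hu
    have hmem : uid ∈ ord := hsub uid (by simp)
    have hbu : b.getD uid [] = (B0.getD uid []).drop r := hb uid (by simp)
    by_cases hl : r < (B0.getD uid []).length
    · have hq : b.getD uid [] = (B0.getD uid [])[r] :: (B0.getD uid []).drop (r + 1) := by
        rw [hbu, List.drop_eq_getElem_cons hl]
      have hpos : 0 < uid := by
        by_contra hle
        rw [Int.not_lt] at hle
        have h1 := hneg uid hmem hle
        omega
      have hcap : u.getD uid 0 ≥ m ∧ uid > 0 := by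
        refine ⟨?_, hpos⟩
        rw [hu uid (by simp)]
        omega
      simp only [pvPhase1, hq, if_pos hcap]
      exact ih b u out p (fun x hx => hsub x (by simp [hx])) (fun x hx => hb x (by simp [hx]))
        (fun x hx => hu x (by simp [hx]))
    · have hq : b.getD uid [] = [] := by
        rw [hbu]; exact List.drop_eq_nil_of_le (Nat.le_of_not_lt hl)
      simp only [pvPhase1, hq]
      exact ih b u out p (fun x hx => hsub x (by simp [hx])) (fun x hx => hb x (by simp [hx]))
        (fun x hx => hu x (by simp [hx]))

-- phase 2 pops the head of every non-empty bucket, extending out by exactly row r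
theorem pvPhase2_round (B0 : pvD) (ord : List Int) (N : Nat) (r : Nat) (hnd : ord.Nodup)
    (hN : N = (ord.map (fun u => (B0.getD u []).length)).sum) :
    ∀ todo done b out, ord = done ++ todo →
    (∀ x ∈ todo, b.getD x [] = (B0.getD x []).drop r) →
    (∀ x ∈ done, b.getD x [] = (B0.getD x []).drop (r + 1)) →
    (out.length = (done.map (fun u => min (r + 1) (B0.getD u []).length)).sum
        + (todo.map (fun u => min r (B0.getD u []).length)).sum) →
    (out = pvRows B0 ord r ++ pvRowF B0 done r) →
    ∃ b', pvPhase2 N todo b out = (b', pvRows B0 ord (r + 1))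
      ∧ (∀ x ∈ ord, b'.getD x [] = (B0.getD x []).drop (r + 1)) := by
  intro todo
  induction todo with
  | nil =>
    intro done b out hsplit hb hb2 hlenEq hout
    have hdone : done = ord := by simpa using hsplit.symm
    refine ⟨b, ?_, fun x hx => hb2 x (hdone ▸ hx)⟩
    simp only [pvPhase2]
    rw [hout, pvRows_succ, hdone]
  | cons uid rest ih =>
    intro done b out hsplit hb hb2 hlenEq hout
    have hnd2 : (done ++ uid :: rest).Nodup := hsplit ▸ hnd
    have huid_done : uid ∉ done := fun hmem =>
      (List.disjoint_of_nodup_append hnd2) hmem (by simp)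
    have huid_rest : uid ∉ rest := (List.nodup_cons.mp hnd2.of_append_right).1
    have hbu : b.getD uid [] = (B0.getD uid []).drop r := hb uid (by simp)
    simp only [List.map_cons, List.sum_cons] at hlenEq
    by_cases hl : r < (B0.getD uid []).length
    · have hq : b.getD uid [] = (B0.getD uid [])[r] :: (B0.getD uid []).drop (r + 1) := by
        rw [hbu, List.drop_eq_getElem_cons hl]
      have hgd : (B0.getD uid []).getD r [] = (B0.getD uid [])[r] := by
        simp [List.getD_eq_getElem?_getD, List.getElem?_eq_getElem hl]
      simp only [pvPhase2, hq]
      by_cases hbreak : N ≤ (out ++ [(B0.getD uid [])[r]]).length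
      · rw [if_pos hbreak]
        simp only [List.length_append, List.length_cons, List.length_nil] at hbreak
        have hsOrd : (ord.map (fun u => (B0.getD u []).length)).sum
            = (done.map (fun u => (B0.getD u []).length)).sum + (B0.getD uid []).length
              + (rest.map (fun u => (B0.getD u []).length)).sum := by
          rw [hsplit]; simp [List.sum_append]; omega
        have hdone_le : (done.map (fun u => min (r + 1) (B0.getD u []).length)).sum
            ≤ (done.map (fun u => (B0.getD u []).length)).sum :=
          List.sum_le_sum (fun x _ => Nat.min_le_right _ _)
        have hminr : min r (B0.getD uid []).length = r := Nat.min_eq_left (Nat.le_of_lt hl)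
        rw [hminr] at hlenEq
        have hrest_ge : (rest.map (fun u => (B0.getD u []).length)).sum
            ≤ (rest.map (fun u => min r (B0.getD u []).length)).sum := by omega
        have hrest : ∀ x ∈ rest, (B0.getD x []).length ≤ r := by
          have hres := eq_of_sum_ge rest (fun u => min r (B0.getD u []).length)
            (fun u => (B0.getD u []).length) (fun x _ => Nat.min_le_right _ _) hrest_ge
          intro x hx
          have := hres x hx
          simp only at this
          omega
        refine ⟨b.insert uid ((B0.getD uid []).drop (r + 1)), ?_, ?_⟩
        · have h0 : rest.filter (fun u => decide (r < (B0.getD u []).length)) = [] :=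
            List.filter_eq_nil_iff.mpr
              (fun x hx => by simpa using Nat.not_lt.mpr (hrest x hx))
          have hrow : pvRowF B0 (uid :: rest) r = [(B0.getD uid [])[r]] := by
            simp [pvRowF, hl, h0]
          rw [hout, pvRows_succ, hsplit, pvRowF_append, hrow]
          simp
        · intro x hx
          rcases (by rw [hsplit] at hx; exact List.mem_append.mp hx) with hx' | hx'
          · rw [PySem.Dict.getD_insert_of_ne _ _ _ (fun he => huid_done (by rw [← he]; exact hx'))]
            exact hb2 x hx'
          · rcases List.mem_cons.mp hx' with rfl | hx''
            · rw [PySem.Dict.getD_insert_self]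
            · rw [PySem.Dict.getD_insert_of_ne _ _ _ (fun he => huid_rest (by rw [← he]; exact hx''))]
              rw [hb x (by simp [hx'']), List.drop_eq_nil_of_le (hrest x hx''),
                List.drop_eq_nil_of_le (Nat.le_trans (hrest x hx'') (Nat.le_succ r))]
      · rw [if_neg hbreak]
        have hsplit' : ord = (done ++ [uid]) ++ rest := by rw [hsplit]; simp
        obtain ⟨b', heq, hb'⟩ := ih (done ++ [uid])
          (b.insert uid ((B0.getD uid []).drop (r + 1)))
          (out ++ [(B0.getD uid [])[r]]) hsplit'
          (fun x hx => by
            rw [PySem.Dict.getD_insert_of_ne _ _ _ (fun he => huid_rest (by rw [← he]; exact hx))]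
            exact hb x (by simp [hx]))
          (fun x hx => by
            rcases List.mem_append.mp hx with hx' | hx'
            · rw [PySem.Dict.getD_insert_of_ne _ _ _ (fun he => huid_done (by rw [← he]; exact hx'))]
              exact hb2 x hx'
            · have : x = uid := by simpa using hx'
              subst this
              rw [PySem.Dict.getD_insert_self])
          (by simp only [List.map_append, List.sum_append, List.map_cons, List.sum_cons,
              List.map_nil, List.sum_nil, List.length_append, List.length_cons, List.length_nil]
              omega)
          (by rw [hout, pvRowF_append]
              have hrow : pvRowF B0 [uid] r = [(B0.getD uid []).getD r []] := by
                simp [pvRowF, hl]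
              rw [hrow, hgd]
              simp)
        exact ⟨b', heq, hb'⟩
    · have hq : b.getD uid [] = [] := by
        rw [hbu]; exact List.drop_eq_nil_of_le (Nat.le_of_not_lt hl)
      have hlen : (B0.getD uid []).length ≤ r := Nat.le_of_not_lt hl
      simp only [pvPhase2, hq]
      have hsplit' : ord = (done ++ [uid]) ++ rest := by rw [hsplit]; simp
      obtain ⟨b', heq, hb'⟩ := ih (done ++ [uid]) b out hsplit'
        (fun x hx => hb x (by simp [hx]))
        (fun x hx => by
          rcases List.mem_append.mp hx with hx' | hx'
          · exact hb2 x hx'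
          · have : x = uid := by simpa using hx'
            subst this
            rw [hbu, List.drop_eq_nil_of_le hlen, List.drop_eq_nil_of_le (by omega)])
        (by simp only [List.map_append, List.sum_append, List.map_cons, List.sum_cons,
            List.map_nil, List.sum_nil]
            omega)
        (by rw [hout, pvRowF_append]
            have hrow : pvRowF B0 [uid] r = [] := by
              simp [pvRowF, Nat.not_lt.mpr hlen]
            rw [hrow]
            simp)
      exact ⟨b', heq, hb'⟩

-- the while loop, started after r completed rounds, finishes the transpose
theorem pvWhile_eq (B0 : pvD) (ord : List Int) (m : Int) (N L : Nat)
    (hm : 1 ≤ m) (hnd : ord.Nodup)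
    (hneg : ∀ x ∈ ord, x ≤ 0 → (B0.getD x []).length = 1)
    (hN : N = (ord.map (fun u => (B0.getD u []).length)).sum)
    (hL : ∀ x ∈ ord, (B0.getD x []).length ≤ L)
    (hLub : ∀ k, (∀ x ∈ ord, (B0.getD x []).length ≤ k) → L ≤ k) :
    ∀ fuel r b u, L ≤ r + fuel →
    (∀ x ∈ ord, b.getD x [] = (B0.getD x []).drop r) →
    (∀ x ∈ ord, u.getD x 0 = min (min (r : Int) ((B0.getD x []).length : Int)) m) →
    pvWhile m N ord fuel b u (pvRows B0 ord r) = pvRows B0 ord L := by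
  intro fuel
  induction fuel with
  | zero =>
    intro r b u hfuel hb hu
    simp only [pvWhile]
    exact pvRows_of_le B0 ord L r hL (by omega)
  | succ fuel ih =>
    intro r b u hfuel hb hu
    simp only [pvWhile]
    by_cases hcond : (pvRows B0 ord r).length < N
    · rw [if_pos hcond]
      have hex : ∃ x ∈ ord, r < (B0.getD x []).length := by
        by_contra hno
        push Not at hno
        have hmap : ord.map (fun u => min r (B0.getD u []).length)
            = ord.map (fun u => (B0.getD u []).length) :=
          List.map_congr_left (fun x hx => by have := hno x hx; omega)
        rw [pvRows_length, hmap, ← hN] at hcond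
        omega
      obtain ⟨x0, hx0, hx0l⟩ := hex
      by_cases hrm : (r : Int) < m
      · obtain ⟨b', u', heq, hb', hu'⟩ := pvPhase1_round B0 ord m N r hrm hnd hN ord [] b u
          (pvRows B0 ord r) false (by simp) hb (by simp) hu (by simp)
          (by rw [pvRows_length]; simp) (by simp [pvRowF])
        have hany : ord.any (fun x => decide (r < (B0.getD x []).length)) = true :=
          List.any_eq_true.mpr ⟨x0, hx0, by simpa using hx0l⟩
        rw [Bool.false_or, hany] at heq
        rw [heq]
        exact ih (r + 1) b' u' (by omega) hb' (fun x hx => by have := hu' x hx; push_cast at this ⊢; omega)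
      · rw [Int.not_lt] at hrm
        rw [pvPhase1_skip B0 ord m N r hm hrm hneg ord b u (pvRows B0 ord r) false
          (fun x hx => hx) hb hu]
        obtain ⟨b2, heq2, hb2⟩ := pvPhase2_round B0 ord N r hnd hN ord [] b
          (pvRows B0 ord r) (by simp) hb (by simp)
          (by rw [pvRows_length]; simp) (by simp [pvRowF])
        simp only [heq2]
        exact ih (r + 1) b2 u (by omega) hb2
          (fun x hx => by have := hu x hx; push_cast at this ⊢; omega)
    · rw [if_neg hcond]
      rw [Nat.not_lt, pvRows_length] at hcond
      have hall : ∀ x ∈ ord, (B0.getD x []).length ≤ r := by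
        have hres := eq_of_sum_ge ord (fun u => min r (B0.getD u []).length)
          (fun u => (B0.getD u []).length) (fun x _ => Nat.min_le_right _ _)
          (by rw [← hN]; exact hcond)
        intro x hx
        have := hres x hx
        simp only at this
        omega
      exact pvRows_of_le B0 ord L r hL (hLub r hall)

-- ===== VERDICT (by name: the statement is the Claim_ definition above) =====
theorem diversify_items_py_spec : Claim_equal_diversify_items_py := by
  intro items mpa _
  unfold Spec_diversify_items_py diversify_items_py diversify_items_py_alt
  by_cases hm1 : mpa < 1
  · simp [hm1]
  · simp only [hm1, if_false]
    obtain ⟨hkeys, hnd, hneg, hsum⟩ := pvBuild_inv items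
    set bo := pvBuild items with hbo
    set m' : Int := if mpa > 20 then 20 else mpa with hm'
    have hm'1 : 1 ≤ m' := by rw [hm']; split <;> omega
    set L := bo.2.foldl (fun L uid =>
      if L < (bo.1.getD uid []).length then (bo.1.getD uid []).length else L) 0 with hLdef
    obtain ⟨-, hL, hLub⟩ := pvLongest_aux bo.1 bo.2 0
    have hfuel : L ≤ 0 + (items.length + 1) := by
      have : L ≤ items.length := by
        apply hLub items.length (Nat.zero_le _)
        intro x hx
        rw [← hsum]
        exact List.le_sum_of_mem (List.mem_map.mpr ⟨x, hx, rfl⟩)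
      omega
    have := pvWhile_eq bo.1 bo.2 m' items.length L hm'1 hnd
      (fun x hx h0 => (hneg x hx h0).1) hsum.symm hL (fun k hk => hLub k (Nat.zero_le _) hk)
      (items.length + 1) 0 bo.1 PySem.Dict.empty hfuel
      (by intro x _; simp) (by intro x _; simp [PySem.Dict.getD_empty]; omega)
    simpa [pvRows] using this
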